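-- pv_equiv track=rewrite | github.com/h3x89/hackerrank | codesignal/91.4.1.py | solution
-- ===== SOURCE A (Python) =====
-- def solution(numbers):
--     result = []
--     n = len(numbers)
--
--     # Handle single element case
--     if n == 1:
--         return numbers
--
--     # Add middle element for odd length arrays
--     if n % 2 == 1:
--         result.append(numbers[n // 2])
--
--     # Process pairs starting from middle towards outside
--     for i in range((n - 1) // 2, -1, -1):
--         if i != n // 2:  # Skip middle element if already added
--             result.append(numbers[i] * numbers[n-1-i])
--
--     return result
-- ===== SOURCE B (Python) =====
-- def solution(numbers):
--     if len(numbers) == 1: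
--         return numbers
--     # two pointers converge from the outside; products go on an explicit stack
--     lo, hi = 0, len(numbers) - 1
--     stack = []
--     while lo < hi:
--         stack.append(numbers[lo] * numbers[hi])
--         lo += 1
--         hi -= 1
--     # pointers met on the middle element exactly when the length is odd
--     out = [numbers[lo]] if lo == hi else []
--     # popping the stack emits the pair products from the middle outward
--     while stack:
--         out.append(stack.pop())
--     return out
-- ===== Notes on version B (the rewrite author's own statement) =====
-- stated objective: alternative
-- what changed: B walks two pointers inward from the ends pushing each outer-pair product on an explicit stack, detects the bare middle element by the pointers meeting, and pops the stack to emit the middle-outward order, replacing A's parity test, conditional middle append and countdown index loop with a skip-the-middle test.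
import Mathlib
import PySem

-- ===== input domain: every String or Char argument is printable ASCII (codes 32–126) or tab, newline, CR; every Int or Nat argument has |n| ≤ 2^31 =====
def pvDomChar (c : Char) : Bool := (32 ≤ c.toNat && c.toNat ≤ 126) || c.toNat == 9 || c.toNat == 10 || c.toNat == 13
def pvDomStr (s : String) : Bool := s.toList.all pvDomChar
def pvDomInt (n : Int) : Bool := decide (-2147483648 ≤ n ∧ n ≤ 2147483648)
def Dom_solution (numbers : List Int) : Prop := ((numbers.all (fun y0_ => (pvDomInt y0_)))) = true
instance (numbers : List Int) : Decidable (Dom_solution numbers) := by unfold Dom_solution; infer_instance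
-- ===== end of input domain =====

-- B walks two pointers inward from the ends pushing pair products on an explicit stack, detects
-- the bare middle element by the pointers meeting, and pops the stack to emit middle-outward order;
-- same values, different decomposition (A's n==1 case returns the argument list itself, as does B).

-- ===== PORT A =====
def solution (numbers : List Int) : List Int :=
  let n : Int := numbers.length
  if n == 1 then numbers
  else
    let result : List Int :=
      if PySem.Int.mod n 2 == 1 then [PySem.List.pyGetD numbers (PySem.Int.floordiv n 2) 0] else []
    (PySem.List.pyRange (PySem.Int.floordiv (n - 1) 2) (-1) (-1)).foldl
      (fun acc i =>
        if i != PySem.Int.floordiv n 2 then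
          acc ++ [PySem.List.pyGetD numbers i 0 * PySem.List.pyGetD numbers (n - 1 - i) 0]
        else acc) result

-- ===== PORT B =====
-- Source B's first while loop: two pointers converge, pushing products on the stack
def solutionInward (numbers : List Int) (lo hi : Int) (stack : List Int) : Int × Int × List Int :=
  if lo < hi then
    solutionInward numbers (lo + 1) (hi - 1)
      (stack ++ [PySem.List.pyGetD numbers lo 0 * PySem.List.pyGetD numbers hi 0])
  else (lo, hi, stack)
termination_by (hi - lo).toNat
decreasing_by simp at *; omega

-- Source B's second while loop: pop the stack onto out
def solutionDrain (stack out : List Int) : List Int :=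
  if stack.isEmpty then out
  else solutionDrain stack.dropLast (out ++ [stack.getLastD 0])
termination_by stack.length
decreasing_by cases stack <;> simp_all

def solution_alt (numbers : List Int) : List Int :=
  if numbers.length == 1 then numbers
  else
    let r := solutionInward numbers 0 ((numbers.length : Int) - 1) []
    let out := if r.1 == r.2.1 then [PySem.List.pyGetD numbers r.1 0] else []
    solutionDrain r.2.2 out

-- ===== PRECONDITION & SPEC =====
def Spec_solution (numbers : List Int) (out : List Int) : Prop := out = solution_alt numbers
instance (numbers : List Int) (out : List Int) : Decidable (Spec_solution numbers out) := by unfold Spec_solution; infer_instance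

-- ===== CLAIM (what is proved, stated in full; the proofs are below) =====
def Claim_equal_solution : Prop := ∀ (numbers : List Int), Dom_solution numbers → Spec_solution numbers (solution numbers)

-- ===== LEMMAS AND PROOFS =====

-- common closed form both ports are reduced to
def solutionPairsForm (xs : List Int) (lo hi : Int) : List Int :=
  (if lo ≤ hi ∧ (hi - lo) % 2 = 0 then [PySem.List.pyGetD xs ((lo + hi) / 2) 0] else []) ++
  ((PySem.List.pyRange lo ((lo + hi + 1) / 2) 1).map
      (fun i => PySem.List.pyGetD xs i 0 * PySem.List.pyGetD xs (lo + hi - i) 0)).reverse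

theorem drain_eq_append_reverse (stack out : List Int) :
    solutionDrain stack out = out ++ stack.reverse := by
  by_cases h : stack = []
  · rw [solutionDrain]; simp [h]
  · rw [solutionDrain, if_neg (by simpa using h),
        drain_eq_append_reverse stack.dropLast]
    conv_rhs => rw [← List.dropLast_append_getLast h]
    rw [List.getLastD_eq_getLast?, List.getLast?_eq_some_getLast h]
    simp
termination_by stack.length
decreasing_by cases stack <;> simp_all

theorem inward_eq (xs : List Int) (lo hi : Int) (st : List Int) (hge : lo ≤ hi + 1) :
    solutionInward xs lo hi st =
      ((lo + hi + 1) / 2, (lo + hi) / 2,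
        st ++ (PySem.List.pyRange lo ((lo + hi + 1) / 2) 1).map
          (fun i => PySem.List.pyGetD xs i 0 * PySem.List.pyGetD xs (lo + hi - i) 0)) := by
  by_cases h : lo < hi
  · rw [solutionInward, if_pos h, inward_eq xs (lo + 1) (hi - 1) _ (by omega)]
    have hmid : (lo + 1) + (hi - 1) = lo + hi := by ring
    rw [hmid, PySem.List.pyRange_one_cons (a := lo) (b := (lo + hi + 1) / 2) (by omega)]
    simp [List.append_assoc]
  · rw [solutionInward, if_neg h,
        PySem.List.pyRange_one_eq_nil (by omega)]
    have h1 : (lo + hi + 1) / 2 = lo := by omega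
    have h2 : (lo + hi) / 2 = hi := by omega
    simp [h1, h2]
termination_by (hi - lo).toNat
decreasing_by omega

theorem alt_eq_pairsForm (xs : List Int) (h1 : ¬ xs.length = 1) :
    solution_alt xs = solutionPairsForm xs 0 ((xs.length : Int) - 1) := by
  rw [solution_alt, if_neg (by simpa using h1)]
  rw [inward_eq xs 0 _ [] (by omega)]
  simp only [solutionPairsForm, drain_eq_append_reverse]
  have e1 : (0 + ((xs.length : Int) - 1) + 1) / 2 = ((xs.length : Int)) / 2 := by omega
  have e2 : (0 + ((xs.length : Int) - 1)) / 2 = ((xs.length : Int) - 1) / 2 := by omega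
  simp only [e1, e2, List.nil_append, beq_iff_eq]
  congr 1
  by_cases hodd : ((xs.length : Int)) % 2 = 1
  · rw [if_pos (by omega), if_pos (by omega)]
    have e3 : ((xs.length : Int) - 1) / 2 = (xs.length : Int) / 2 := by omega
    rw [e3]
  · rw [if_neg (by omega), if_neg (by omega)]

theorem solution_eq_pairsForm (xs : List Int) (h1 : (xs.length : Int) ≠ 1) :
    solution xs = solutionPairsForm xs 0 ((xs.length : Int) - 1) := by
  have hf : ∀ a : Int, PySem.Int.floordiv a 2 = a / 2 :=
    fun a => PySem.Int.floordiv_eq_ediv_of_pos (by norm_num)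
  have hm : ∀ a : Int, PySem.Int.mod a 2 = a % 2 :=
    fun a => PySem.Int.mod_eq_emod_of_pos (by norm_num)
  simp only [solution, solutionPairsForm, beq_iff_eq, h1, if_false, hf, hm,
    PySem.List.pyRange_neg_one_eq_reverse, PySem.List.foldl_append_if,
    List.filter_reverse, List.map_reverse]
  norm_num
  rcases Int.emod_two_eq (xs.length : Int) with hpar | hpar
  · have hm2 : ((xs.length : Int) - 1) / 2 + 1 = (xs.length : Int) / 2 := by omega
    rw [hpar, hm2, if_neg (by decide), if_neg (by omega),
        List.filter_eq_self.mpr, List.nil_append]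
    intro i hi
    have := (PySem.List.mem_pyRange_one).mp hi
    simp only [bne_iff_ne, ne_eq]
    omega
  · have hn1 : (1:Int) ≤ (xs.length : Int) := by
      rcases Nat.eq_zero_or_pos xs.length with h0 | h0
      · exfalso; rw [h0] at hpar; norm_num at hpar
      · exact_mod_cast h0
    have hm2 : ((xs.length : Int) - 1) / 2 + 1 = (xs.length : Int) / 2 + 1 := by omega
    rw [hpar, hm2, if_pos (by decide), if_pos (by omega),
        PySem.List.pyRange_one_succ_right (by omega),
        List.filter_append, List.filter_eq_self.mpr
          (by intro i hi; have := (PySem.List.mem_pyRange_one).mp hi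
              simp only [bne_iff_ne, ne_eq]; omega)]
    simp
    congr 1
    omega

-- ===== VERDICT (by name: the statement is the Claim_ definition above) =====
theorem solution_spec : Claim_equal_solution := by
  intro xs _
  unfold Spec_solution
  by_cases h1 : xs.length = 1
  · simp [solution, solution_alt, h1]
  · have h1' : (xs.length : Int) ≠ 1 := by exact_mod_cast h1
    rw [alt_eq_pairsForm xs h1]
    exact solution_eq_pairsForm xs h1'
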